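-- pv_equiv track=rewrite | github.com/CraftSpider/AIRC | airc/server.py | _handle_args
-- ===== SOURCE A (Python) =====
-- def _handle_args(args):
--     args = args.lstrip()
--     out_args = []
--     rest = False
--     tmp = ""
--     for char in args:
--         if rest:
--             tmp += char
--         elif char == " ":
--             out_args.append(tmp)
--             tmp = ""
--         elif char == ":" and tmp == "":
--             rest = True
--         else:
--             tmp += char
--     if tmp:
--         out_args.append(tmp)
--     return out_args
-- ===== SOURCE B (Python) =====
-- def _handle_args(args):
--     tokens = args.lstrip().split(" ")
--     i = next((j for j, t in enumerate(tokens) if t.startswith(":")), None)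
--     if i is None:
--         return tokens[:-1] if tokens[-1] == "" else tokens
--     rest = " ".join([tokens[i][1:]] + tokens[i + 1:])
--     return tokens[:i] + ([rest] if rest else [])
-- ===== Notes on version B (the rewrite author's own statement) =====
-- stated objective: faster
-- what changed: Replaces A's per-character state machine (rest flag plus tmp accumulator) with a single-space split into tokens, a scan for the first colon-prefixed token, and a join-based reassembly of the trailing rest argument.
import Mathlib
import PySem

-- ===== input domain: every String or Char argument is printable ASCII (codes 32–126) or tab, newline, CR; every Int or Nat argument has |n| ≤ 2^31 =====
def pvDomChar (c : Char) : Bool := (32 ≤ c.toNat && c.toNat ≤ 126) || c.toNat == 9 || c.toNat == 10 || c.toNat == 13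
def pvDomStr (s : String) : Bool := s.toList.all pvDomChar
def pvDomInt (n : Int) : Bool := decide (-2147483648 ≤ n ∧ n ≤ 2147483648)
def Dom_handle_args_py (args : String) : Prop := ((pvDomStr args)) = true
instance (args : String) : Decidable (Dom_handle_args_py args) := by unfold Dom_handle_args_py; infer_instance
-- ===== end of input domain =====

-- B replaces A's per-character accumulator/rest-flag state machine by a single-space split, a scan for the first colon-prefixed token, and a join reassembly; a timing run measured B faster (C-level split/join instead of a per-char Python loop).

-- ===== PORT A =====
-- A's loop body: state is (out_args, rest, tmp); branches in A's order.
def pvStepA (st : List (List Char) × Bool × List Char) (c : Char) :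
    List (List Char) × Bool × List Char :=
  if st.2.1 then (st.1, st.2.1, st.2.2 ++ [c])
  else if c = ' ' then (st.1 ++ [st.2.2], st.2.1, [])
  else if c = ':' ∧ st.2.2 = [] then (st.1, true, st.2.2)
  else (st.1, st.2.1, st.2.2 ++ [c])

def handle_args_py (args : String) : List String :=
  let s := PySem.Chars.lstrip args.toList
  let st := s.foldl pvStepA ([], false, [])
  (if st.2.2 ≠ [] then st.1 ++ [st.2.2] else st.1).map String.mk

-- ===== PORT B =====
def handle_args_py_alt (args : String) : List String :=
  let tokens := PySem.Chars.splitOn (PySem.Chars.lstrip args.toList) [' ']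
  match tokens.findIdx? (fun t => PySem.Chars.startswith t [':']) with
  | none =>
      (if tokens.getLast? = some ([] : List Char)
        then PySem.List.slice tokens none (some (-1)) else tokens).map String.mk
  | some i =>
      let rest := PySem.Chars.join [' ']
        (PySem.List.slice (tokens.getD i []) (some 1) none ::
          PySem.List.slice tokens (some ((i : Int) + 1)) none)
      (PySem.List.slice tokens none (some (i : Int)) ++
        (if rest ≠ [] then [rest] else [])).map String.mk

-- ===== PRECONDITION & SPEC =====
def Spec_handle_args_py (args : String) (out : List String) : Prop := out = handle_args_py_alt args
instance (args : String) (out : List String) : Decidable (Spec_handle_args_py args out) := by unfold Spec_handle_args_py; infer_instance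

-- ===== CLAIM (what is proved, stated in full; the proofs are below) =====
def Claim_equal_handle_args_py : Prop := ∀ (args : String), Dom_handle_args_py args → Spec_handle_args_py args (handle_args_py args)

-- ===== LEMMAS AND PROOFS =====

-- split-on-single-space as a structural recursion (proof-side model of B's tokens)
def pvSplit (pre : List Char) : List Char → List (List Char)
  | [] => [pre]
  | c :: s => if c = ' ' then pre :: pvSplit [] s else pvSplit (pre ++ [c]) s

-- A's post-loop finish step
def pvFin (st : List (List Char) × Bool × List Char) : List (List Char) :=
  if st.2.2 ≠ [] then st.1 ++ [st.2.2] else st.1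

-- B's computation on the token list (proof-side model of B's branches)
def pvB (tokens : List (List Char)) : List (List Char) :=
  match tokens.findIdx? (fun t => PySem.Chars.startswith t [':']) with
  | none => if tokens.getLast? = some ([] : List Char) then tokens.dropLast else tokens
  | some i =>
      let rest := PySem.Chars.join [' '] ((tokens.getD i []).drop 1 :: tokens.drop (i + 1))
      tokens.take i ++ (if rest ≠ [] then [rest] else [])

theorem pvSplit_nil (pre : List Char) : pvSplit pre [] = [pre] := rfl

theorem pvSplit_space (pre t : List Char) : pvSplit pre (' ' :: t) = pre :: pvSplit [] t := by
  simp [pvSplit]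

theorem pvSplit_char (pre : List Char) (c : Char) (t : List Char) (hc : c ≠ ' ') :
    pvSplit pre (c :: t) = pvSplit (pre ++ [c]) t := by
  simp [pvSplit, hc]

theorem pvStepA_true (out : List (List Char)) (tmp : List Char) (c : Char) :
    pvStepA (out, true, tmp) c = (out, true, tmp ++ [c]) := by simp [pvStepA]

theorem pvStepA_space (out : List (List Char)) (tmp : List Char) :
    pvStepA (out, false, tmp) ' ' = (out ++ [tmp], false, []) := by simp [pvStepA]

theorem pvStepA_colon (out : List (List Char)) :
    pvStepA (out, false, []) ':' = (out, true, []) := by simp [pvStepA]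

theorem pvStepA_other (out : List (List Char)) (tmp : List Char) (c : Char)
    (hc : c ≠ ' ') (h2 : ¬(c = ':' ∧ tmp = [])) :
    pvStepA (out, false, tmp) c = (out, false, tmp ++ [c]) := by
  simp only [pvStepA]
  rw [if_neg (by simp), if_neg hc, if_neg h2]

theorem pvSplit_go_spec (fuel : Nat) :
    ∀ (s cur : List Char) (acc : List (List Char)), s.length < fuel →
      PySem.Chars.splitOn.go [' '] fuel s cur acc = acc.reverse ++ pvSplit cur.reverse s := by
  induction fuel with
  | zero => intro s cur acc h; omega
  | succ n ih =>
    intro s cur acc h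
    cases s with
    | nil => rw [PySem.Chars.splitOn.go.eq_def]; simp [pvSplit_nil]
    | cons c rest =>
      rw [PySem.Chars.splitOn.go.eq_def]
      show (if ([' '] : List Char).isPrefixOf (c :: rest) = true then
          PySem.Chars.splitOn.go [' '] n (List.drop ([' '] : List Char).length (c :: rest)) []
            (cur.reverse :: acc)
        else PySem.Chars.splitOn.go [' '] n rest (c :: cur) acc) =
          acc.reverse ++ pvSplit cur.reverse (c :: rest)
      by_cases hc : c = ' '
      · subst hc
        have hp : ([' '] : List Char).isPrefixOf (' ' :: rest) = true := by
          simp [List.isPrefixOf]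
        rw [hp, if_pos rfl]
        rw [show List.drop ([' '] : List Char).length (' ' :: rest) = rest from rfl]
        rw [ih rest [] (cur.reverse :: acc) (by simp at h ⊢; omega), pvSplit_space]
        rw [List.reverse_cons, List.append_assoc]
        rfl
      · have hp : ([' '] : List Char).isPrefixOf (c :: rest) = false := by
          simp only [List.isPrefixOf_cons₂, List.isPrefixOf_nil_left, Bool.and_true,
            beq_eq_false_iff_ne, ne_eq]
          exact fun e => hc e.symm
        rw [hp, if_neg (by simp)]
        rw [ih rest (c :: cur) acc (by simp at h ⊢; omega)]
        rw [pvSplit_char _ _ _ hc]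
        simp

theorem pvSplit_splitOn (s : List Char) :
    PySem.Chars.splitOn s [' '] = pvSplit [] s := by
  have := pvSplit_go_spec (s.length + 1) s [] [] (by omega)
  simpa [PySem.Chars.splitOn] using this

theorem pvSplit_ne_nil (pre s : List Char) : pvSplit pre s ≠ [] := by
  induction s generalizing pre with
  | nil => simp [pvSplit_nil]
  | cons c t ih =>
    by_cases hc : c = ' '
    · subst hc; simp [pvSplit_space]
    · rw [pvSplit_char _ _ _ hc]; exact ih _

theorem pvSplit_pre (s : List Char) (pre : List Char) :
    pvSplit pre s = (pre ++ (pvSplit [] s).headI) :: (pvSplit [] s).tail := by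
  induction s generalizing pre with
  | nil => simp [pvSplit_nil]
  | cons c t ih =>
    by_cases hc : c = ' '
    · subst hc; simp [pvSplit_space]
    · rw [pvSplit_char _ _ _ hc, pvSplit_char _ _ _ hc, ih (pre ++ [c]), ih ([] ++ [c])]
      simp

theorem pvJoin_pvSplit (s : List Char) (pre : List Char) :
    PySem.Chars.join [' '] (pvSplit pre s) = pre ++ s := by
  induction s generalizing pre with
  | nil => simp [pvSplit_nil, PySem.Chars.join_singleton]
  | cons c t ih =>
    by_cases hc : c = ' '
    · subst hc
      obtain ⟨h0, tl, e⟩ := List.exists_cons_of_ne_nil (pvSplit_ne_nil [] t)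
      rw [pvSplit_space, e, PySem.Chars.join_cons_cons]
      have hjj := ih ([] : List Char)
      rw [e] at hjj
      rw [hjj]
      simp
    · rw [pvSplit_char _ _ _ hc, ih (pre ++ [c])]
      simp

theorem pvFoldl_rest (s : List Char) : ∀ (out : List (List Char)) (tmp : List Char),
    s.foldl pvStepA (out, true, tmp) = (out, true, tmp ++ s) := by
  induction s with
  | nil => simp
  | cons c t ih => intro out tmp; rw [List.foldl_cons, pvStepA_true, ih]; simp

theorem pvFoldl_out (s : List Char) : ∀ (out : List (List Char)) (r : Bool) (tmp : List Char),
    s.foldl pvStepA (out, r, tmp) =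
      (out ++ (s.foldl pvStepA ([], r, tmp)).1, (s.foldl pvStepA ([], r, tmp)).2) := by
  induction s with
  | nil => simp
  | cons c t ih =>
    intro out r tmp
    cases r with
    | true => rw [pvFoldl_rest, pvFoldl_rest]; simp
    | false =>
      by_cases hc : c = ' '
      · subst hc
        rw [List.foldl_cons, List.foldl_cons, pvStepA_space, pvStepA_space,
          ih (out ++ [tmp]), ih ([] ++ [tmp])]
        simp
      · by_cases h2 : c = ':' ∧ tmp = []
        · obtain ⟨hc', htmp⟩ := h2
          subst hc'; subst htmp
          rw [List.foldl_cons, List.foldl_cons, pvStepA_colon, pvStepA_colon,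
            pvFoldl_rest, pvFoldl_rest]
          simp
        · rw [List.foldl_cons, List.foldl_cons, pvStepA_other _ _ _ hc h2,
            pvStepA_other _ _ _ hc h2, ih out, ih []]

theorem pvStarts_iff (t : List Char) :
    PySem.Chars.startswith t [':'] = true ↔ t.head? = some ':' := by
  cases t with
  | nil => simp [PySem.Chars.startswith, List.isPrefixOf]
  | cons c r =>
    simp only [PySem.Chars.startswith, List.isPrefixOf, Bool.and_true,
      beq_iff_eq, List.head?_cons, Option.some.injEq]
    exact eq_comm

theorem pvB_cons (t : List Char) (toks : List (List Char)) (ht : t.head? ≠ some ':')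
    (hne : toks ≠ []) : pvB (t :: toks) = t :: pvB toks := by
  have hp : PySem.Chars.startswith t [':'] = false := by
    rw [← Bool.not_eq_true, pvStarts_iff]; exact ht
  unfold pvB
  rw [List.findIdx?_cons]
  simp only [hp, Bool.false_eq_true, if_false]
  cases hfi : toks.findIdx? (fun t => PySem.Chars.startswith t [':']) with
  | none =>
    simp only [Option.map_none]
    have hl : (t :: toks).getLast? = toks.getLast? := by
      cases toks with
      | nil => exact absurd rfl hne
      | cons a l => simp [List.getLast?_cons_cons]
    rw [hl, List.dropLast_cons_of_ne_nil hne]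
    split_ifs <;> rfl
  | some i =>
    simp only [Option.map_some]
    simp [List.take_succ_cons, List.drop_succ_cons]

theorem pvMain (s : List Char) : ∀ (tmp : List Char), tmp.head? ≠ some ':' →
    pvFin (s.foldl pvStepA ([], false, tmp)) = pvB (pvSplit tmp s) := by
  induction s with
  | nil =>
    intro tmp ht
    have hp : PySem.Chars.startswith tmp [':'] = false := by
      rw [← Bool.not_eq_true, pvStarts_iff]; exact ht
    rw [pvSplit_nil]
    unfold pvB
    rw [List.findIdx?_cons]
    simp only [hp, Bool.false_eq_true, if_false, List.findIdx?_nil, Option.map_none]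
    by_cases h : tmp = []
    · subst h; simp [pvFin]
    · simp [pvFin, h]
  | cons c t ih =>
    intro tmp ht
    by_cases hc : c = ' '
    · subst hc
      rw [List.foldl_cons, pvStepA_space]
      simp only [List.nil_append]
      rw [pvFoldl_out t [tmp] false []]
      have hfin : ∀ p : List (List Char) × Bool × List Char,
          pvFin ([tmp] ++ p.1, p.2) = tmp :: pvFin p := by
        intro p; unfold pvFin; split_ifs <;> simp
      rw [hfin, ih [] (by simp)]
      rw [pvSplit_space, pvB_cons tmp _ ht (pvSplit_ne_nil [] t)]
    · by_cases h2 : c = ':' ∧ tmp = []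
      · obtain ⟨hc', htmp⟩ := h2
        subst hc'; subst htmp
        rw [List.foldl_cons, pvStepA_colon, pvFoldl_rest]
        rw [pvSplit_char _ _ _ hc]
        simp only [List.nil_append]
        rw [pvSplit_pre t [':']]
        obtain ⟨h0, tl, e⟩ := List.exists_cons_of_ne_nil (pvSplit_ne_nil [] t)
        rw [e]
        unfold pvB
        rw [List.findIdx?_cons]
        have hst : PySem.Chars.startswith (':' :: ((h0 :: tl).headI)) [':'] = true := by
          rw [pvStarts_iff]; simp
        simp only [List.cons_append, List.nil_append] at hst ⊢
        rw [if_pos hst]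
        have hj : PySem.Chars.join [' '] (h0 :: tl) = t := by
          have hjj := pvJoin_pvSplit t ([] : List Char)
          rw [e] at hjj; simpa using hjj
        simp only [List.take_zero, List.getD_cons_zero, List.drop_succ_cons, List.drop_zero,
          List.tail_cons, List.headI, hj]
        unfold pvFin
        by_cases hT : t = [] <;> simp [hT]
      · rw [List.foldl_cons, pvStepA_other _ _ _ hc h2]
        have hinv : (tmp ++ [c]).head? ≠ some ':' := by
          cases tmp with
          | nil =>
            simp only [List.nil_append, List.head?_cons, ne_eq, Option.some.injEq]
            intro hcc; exact h2 ⟨hcc, rfl⟩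
          | cons a r => simpa using ht
        rw [ih (tmp ++ [c]) hinv, pvSplit_char _ _ _ hc]

theorem pvAlt_eq (args : String) :
    handle_args_py_alt args = (pvB (pvSplit [] (PySem.Chars.lstrip args.toList))).map String.mk := by
  unfold handle_args_py_alt pvB
  rw [pvSplit_splitOn]
  simp only []
  cases hfi : (pvSplit [] (PySem.Chars.lstrip args.toList)).findIdx?
      (fun t => PySem.Chars.startswith t [':']) with
  | none => simp [PySem.List.slice_to_neg_one]
  | some i =>
    dsimp only
    simp only [PySem.List.slice_from _ (a := 1) (by omega : (0:Int) ≤ 1),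
      PySem.List.slice_from _ (a := (i : Int) + 1) (by positivity),
      PySem.List.slice_to _ (b := (i : Int)) (by positivity)]
    have h2 : ((i : Int) + 1).toNat = i + 1 := by omega
    have h3 : ((i : Int)).toNat = i := by omega
    rw [h2, h3]
    rfl

-- ===== VERDICT (by name: the statement is the Claim_ definition above) =====
theorem handle_args_py_spec : Claim_equal_handle_args_py := by
  intro args _
  unfold Spec_handle_args_py handle_args_py
  simp only []
  rw [pvAlt_eq]
  show (pvFin ((PySem.Chars.lstrip args.toList).foldl pvStepA ([], false, []))).map String.mk = _
  rw [pvMain (PySem.Chars.lstrip args.toList) [] (by simp)]
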